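-- pv_equiv track=rewrite | github.com/MaxG87/dlna-tree | baue_baum.py | iter_nsplits
-- ===== SOURCE A (Python) =====
-- from typing import Iterable, List, Mapping, Tuple, TypeVar
--
-- SPLIT_POS_T = Tuple[int, ...]
--
-- def iter_nsplits(nof_elems: int, num_splits: int) -> Iterable[SPLIT_POS_T]:
--     """Yield all possible splits
--
--     This function will generate all possible splits for the given number of
--     elements and split positions. Having nof_elems <= num_splits is illegal and
--     causes a ValueError to be raised.
--
--     Parameters
--     ----------
--     nof_elems
--         Number of elements that need to be splitted.
--
--     num_splits
--         Number of required splits. Typically the branching factor.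
--
--     Returns
--     -------
--     Iterable[SPLIT_POS_T]
--         Lazy stream of all possible split positions
--
--     Raises
--     ------
--     ValueError
--         If nof_elem <= num_splits
--
--     Example:
--     --------
--     >>> all_splits = iter_nsplits(4,2)
--     >>> next(all_splits)
--     (1, 2)
--     >>> next(all_splits)
--     (1, 3)
--     >>> next(all_splits)
--     (2, 3)
--     >>> next(all_splits)
--     Traceback (most recent call last):
--         ...
--     StopIteration
--     """
--
--     def iter_nsplits_worker(
--         nof_elems: int,
--         num_splits: int,
--         start_idx: int,
--         start_tuple: SPLIT_POS_T,
--     ):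
--         if num_splits == 0:
--             yield start_tuple
--             return
--         for split_pos in range(start_idx, nof_elems - num_splits + 1):
--             new_tuple = start_tuple + (split_pos,)
--             yield from iter_nsplits_worker(
--                 nof_elems=nof_elems,
--                 num_splits=num_splits - 1,
--                 start_idx=split_pos + 1,
--                 start_tuple=new_tuple,
--             )
--
--     if nof_elems <= num_splits:
--         raise ValueError
--
--     yield from iter_nsplits_worker(
--         nof_elems=nof_elems, num_splits=num_splits, start_idx=1, start_tuple=()
--     )
-- ===== SOURCE B (Python) =====
-- def iter_nsplits(nof_elems: int, num_splits: int):
--     """Yield all possible splits (lazy, lexicographic).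
--
--     Recurses on the pool of candidate split positions: take the head and
--     recurse for the remaining splits, then drop the head and continue the
--     loop. The pool is kept as a range object, so slicing it is O(1).
--     """
--     if nof_elems <= num_splits:
--         raise ValueError
--
--     def combos(pool, k):
--         if k == 0:
--             yield ()
--             return
--         while len(pool) >= k:
--             head, rest = pool[0], pool[1:]
--             for c in combos(rest, k - 1):
--                 yield (head,) + c
--             pool = rest
--
--     yield from combos(range(1, nof_elems), num_splits)
-- ===== Notes on version B (the rewrite author's own statement) =====
-- stated objective: alternative
-- what changed: Replaces A's per-level for-loop over a shrinking range (recursion on the number of remaining splits) by a binary take-the-head/skip-the-head recursion on the pool of candidate positions, with a length check for pruning.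
import Mathlib
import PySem

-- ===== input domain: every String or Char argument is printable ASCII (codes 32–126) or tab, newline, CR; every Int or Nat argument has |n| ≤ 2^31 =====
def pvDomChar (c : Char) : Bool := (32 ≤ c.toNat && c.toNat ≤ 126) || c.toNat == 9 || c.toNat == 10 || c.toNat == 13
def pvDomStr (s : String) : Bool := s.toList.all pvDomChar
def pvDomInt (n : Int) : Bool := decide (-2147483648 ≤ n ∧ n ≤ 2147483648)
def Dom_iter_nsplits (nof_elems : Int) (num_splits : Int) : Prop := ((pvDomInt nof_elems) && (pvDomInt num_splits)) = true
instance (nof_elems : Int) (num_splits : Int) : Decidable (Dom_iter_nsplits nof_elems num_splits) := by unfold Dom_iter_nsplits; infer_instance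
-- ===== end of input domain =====

-- B changes the decomposition only: binary take/skip recursion on the pool instead of a
-- per-level range loop; same values, same order, same cost class (objective: alternative).
-- Both Pythons are generators; equivalence is about the fully materialised stream.

-- ===== PORT A =====
-- worker recurses on num_splits; ported with the (nonnegative, by Pre_) count as a Nat.
def iter_nsplits_worker (nof_elems : Int) (num_splits : Nat) (start_idx : Int)
    (start_tuple : List Int) : List (List Int) :=
  match num_splits with
  | 0 => [start_tuple]
  | k + 1 =>
      (PySem.List.pyRange start_idx (nof_elems - ((k : Int) + 1) + 1) 1).flatMap
        (fun split_pos =>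
          iter_nsplits_worker nof_elems k (split_pos + 1) (start_tuple ++ [split_pos]))

def iter_nsplits (nof_elems : Int) (num_splits : Int) : List (List Int) :=
  if nof_elems ≤ num_splits then []   -- ValueError: excluded by Pre_
  else iter_nsplits_worker nof_elems num_splits.toNat 1 []

-- ===== PORT B =====
-- combos recurses on the pool: take the head, recurse for k-1, then drop the head and
-- continue the while loop (tail recursion).  Source B keeps the pool as a lazy range object
-- (O(1) construction/slicing/len); it is represented here, exactly, by its start `lo`
-- and its length `len` (pool[0] = lo, pool[1:] = (lo+1, len-1), len(pool) = len).
def combosB (lo : Int) (len : Nat) (k : Nat) : List (List Int) :=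
  match k with
  | 0 => [[]]
  | k + 1 =>
      match len with
      | 0 => []                                  -- while guard: len(pool) < k
      | len' + 1 =>
          if len' + 1 < k + 1 then []            -- while guard: len(pool) < k
          else (combosB (lo + 1) len' k).map (fun c => lo :: c)
                 ++ combosB (lo + 1) len' (k + 1)

def iter_nsplits_alt (nof_elems : Int) (num_splits : Int) : List (List Int) :=
  if nof_elems ≤ num_splits then []   -- ValueError: excluded by Pre_
  else combosB 1 (nof_elems - 1).toNat num_splits.toNat

-- ===== PRECONDITION & SPEC =====
-- Pre_ excludes nof_elems <= num_splits (A raises ValueError there) and negative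
-- num_splits (unbounded recursion: A raises RecursionError).
def Pre_iter_nsplits (nof_elems : Int) (num_splits : Int) : Prop :=
  0 ≤ num_splits ∧ num_splits < nof_elems
instance (nof_elems : Int) (num_splits : Int) : Decidable (Pre_iter_nsplits nof_elems num_splits) := by
  unfold Pre_iter_nsplits; infer_instance
def pvWitness_iter_nsplits : Int × Int := (4, 2)

def Spec_iter_nsplits (nof_elems : Int) (num_splits : Int) (out : List (List Int)) : Prop := out = iter_nsplits_alt nof_elems num_splits
instance (nof_elems : Int) (num_splits : Int) (out : List (List Int)) : Decidable (Spec_iter_nsplits nof_elems num_splits out) := by unfold Spec_iter_nsplits; infer_instance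

-- ===== CLAIM (what is proved, stated in full; the proofs are below) =====
def Claim_equal_iter_nsplits : Prop := ∀ (nof_elems : Int) (num_splits : Int), Dom_iter_nsplits nof_elems num_splits → Pre_iter_nsplits nof_elems num_splits → Spec_iter_nsplits nof_elems num_splits (iter_nsplits nof_elems num_splits)

-- ===== LEMMAS AND PROOFS =====

theorem combosB_short (lo : Int) (len k : Nat) (h : len < k) : combosB lo len k = [] := by
  cases k with
  | zero => omega
  | succ k =>
      cases len with
      | zero => rfl
      | succ len' => simp only [combosB]; rw [if_pos (by omega)]

theorem worker_eq_combos (nof_elems : Int) (k : Nat) :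
    ∀ (fuel : Nat) (s : Int) (pre : List Int), (nof_elems - s).toNat ≤ fuel →
      iter_nsplits_worker nof_elems k s pre
        = (combosB s (nof_elems - s).toNat k).map (fun c => pre ++ c) := by
  induction k with
  | zero =>
      intro fuel s pre _
      simp [iter_nsplits_worker, combosB]
  | succ k ih =>
      intro fuel s pre hfuel
      induction fuel generalizing s pre with
      | zero =>
          have hshort : (PySem.List.pyRange s (nof_elems - ((k : Int) + 1) + 1) 1) = [] := by
            simp [PySem.List.pyRange_one, Int.toNat_of_nonpos (by omega : nof_elems - ((k : Int) + 1) + 1 - s ≤ 0)]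
          simp [iter_nsplits_worker, hshort,
            combosB_short s (nof_elems - s).toNat (k + 1) (by omega)]
      | succ fuel ihf =>
          by_cases hlt : s < nof_elems - k
          · -- s is in the outer range
            have houter := PySem.List.pyRange_one_cons (a := s)
              (b := nof_elems - ((k : Int) + 1) + 1) (by omega)
            have hlen : (nof_elems - s).toNat = (nof_elems - (s + 1)).toNat + 1 := by omega
            calc iter_nsplits_worker nof_elems (k + 1) s pre
              = (PySem.List.pyRange s (nof_elems - ((k : Int) + 1) + 1) 1).flatMap
                  (fun p => iter_nsplits_worker nof_elems k (p + 1) (pre ++ [p])) := rfl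
            _ = iter_nsplits_worker nof_elems k (s + 1) (pre ++ [s])
                  ++ (PySem.List.pyRange (s + 1) (nof_elems - ((k : Int) + 1) + 1) 1).flatMap
                  (fun p => iter_nsplits_worker nof_elems k (p + 1) (pre ++ [p])) := by
                  rw [houter]; simp [List.flatMap]
            _ = iter_nsplits_worker nof_elems k (s + 1) (pre ++ [s])
                  ++ iter_nsplits_worker nof_elems (k + 1) (s + 1) pre := rfl
            _ = ((combosB (s + 1) (nof_elems - (s + 1)).toNat k).map
                    (fun c => (pre ++ [s]) ++ c))
                  ++ ((combosB (s + 1) (nof_elems - (s + 1)).toNat (k + 1)).map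
                    (fun c => pre ++ c)) := by
                  rw [ih fuel.succ (s+1) (pre ++ [s]) (by omega), ihf (s+1) pre (by omega)]
            _ = (combosB s (nof_elems - s).toNat (k + 1)).map (fun c => pre ++ c) := by
                  rw [hlen]
                  simp only [combosB]
                  rw [if_neg (by omega)]
                  simp
          · -- outer range empty; pool too short
            have hshort : (PySem.List.pyRange s (nof_elems - ((k : Int) + 1) + 1) 1) = [] := by
              simp [PySem.List.pyRange_one, Int.toNat_of_nonpos (by omega : nof_elems - ((k : Int) + 1) + 1 - s ≤ 0)]
            simp [iter_nsplits_worker, hshort,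
              combosB_short s (nof_elems - s).toNat (k + 1) (by omega)]

-- ===== VERDICT (by name: the statement is the Claim_ definition above) =====
theorem iter_nsplits_spec : Claim_equal_iter_nsplits := by
  intro nof_elems num_splits _ hpre
  unfold Spec_iter_nsplits iter_nsplits iter_nsplits_alt
  obtain ⟨h0, hlt⟩ := hpre
  rw [if_neg (by omega), if_neg (by omega),
    worker_eq_combos nof_elems num_splits.toNat (nof_elems - 1).toNat 1 [] (by omega)]
  simp
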